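-- pv_equiv track=rewrite | github.com/stcady/data-structures-and-algorithms | stack/exercises/paren.py | find_dup_paren
-- ===== SOURCE A (Python) =====
-- def find_dup_paren(expn):
--     stk = []
--     for ch in expn:
--         if ch == ')':
--             count = 0
--             while len(stk) != 0 and stk[-1] != '(':
--                 stk.pop()
--                 count += 1
--             if count <= 1:
--                 return True
--         else:
--             stk.append(ch)
--     return False
-- ===== SOURCE B (Python) =====
-- def find_dup_paren(expn):
--     counts = [0]
--     for ch in expn:
--         if ch == '(':
--             counts.append(0)
--         elif ch == ')':
--             if counts[-1] <= 1:
--                 return True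
--             counts[-1] = 0
--         else:
--             counts[-1] += 1
--     return False
-- ===== Notes on version B (the rewrite author's own statement) =====
-- stated objective: simpler
-- what changed: Replaces the character stack and its inner pop-while loop with a stack of integer segment counters: a closing paren just reads and resets the top counter in O(1), so no inner loop and no stored characters.
import Mathlib
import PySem

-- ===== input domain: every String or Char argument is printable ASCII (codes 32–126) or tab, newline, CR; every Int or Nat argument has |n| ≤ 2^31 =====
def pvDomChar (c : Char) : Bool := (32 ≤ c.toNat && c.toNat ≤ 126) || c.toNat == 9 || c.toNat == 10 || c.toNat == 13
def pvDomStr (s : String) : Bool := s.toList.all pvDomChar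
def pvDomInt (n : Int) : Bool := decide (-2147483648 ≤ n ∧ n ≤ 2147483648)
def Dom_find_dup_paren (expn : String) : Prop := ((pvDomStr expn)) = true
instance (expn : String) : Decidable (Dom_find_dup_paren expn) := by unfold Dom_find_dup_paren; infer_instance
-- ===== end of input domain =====

-- B replaces A's character stack and inner pop-while loop with a stack of
-- integer segment counters (')' reads/resets the top counter); simpler, no inner loop.

-- ===== PORT A =====
-- the inner 'while len(stk) != 0 and stk[-1] != '(': stk.pop(); count += 1' loop
-- (stack head = Python stk[-1]); returns the final stack and count
def popA : List Char → Nat → List Char × Nat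
  | [], count => ([], count)
  | x :: s, count => if x ≠ '(' then popA s (count + 1) else (x :: s, count)

def goA : List Char → List Char → Bool
  | _, [] => false
  | stk, ch :: rest =>
    if ch = ')' then
      let r := popA stk 0
      if r.2 ≤ 1 then true else goA r.1 rest
    else goA (ch :: stk) rest

def find_dup_paren (expn : String) : Bool := goA [] expn.toList

-- ===== PORT B =====
-- state: top counter (counts[-1]) and the rest of the counter stack
def goB : Nat → List Nat → List Char → Bool
  | _, _, [] => false
  | top, cs, ch :: rest =>
    if ch = '(' then goB 0 (top :: cs) rest
    else if ch = ')' then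
      if top ≤ 1 then true else goB 0 cs rest
    else goB (top + 1) cs rest

def find_dup_paren_alt (expn : String) : Bool := goB 0 [] expn.toList

-- ===== PRECONDITION & SPEC =====
def Spec_find_dup_paren (expn : String) (out : Bool) : Prop := out = find_dup_paren_alt expn
instance (expn : String) (out : Bool) : Decidable (Spec_find_dup_paren expn out) := by unfold Spec_find_dup_paren; infer_instance

-- ===== CLAIM (what is proved, stated in full; the proofs are below) =====
def Claim_equal_find_dup_paren : Prop := ∀ (expn : String), Dom_find_dup_paren expn → Spec_find_dup_paren expn (find_dup_paren expn)

-- ===== LEMMAS AND PROOFS =====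

-- abstraction: a char stack as B's counter state (top-segment length, lengths of the deeper segments)
def toCounts : List Char → Nat × List Nat
  | [] => (0, [])
  | x :: s =>
    let r := toCounts s
    if x = '(' then (0, r.1 :: r.2) else (r.1 + 1, r.2)

theorem popA_toCounts (stk : List Char) (c : Nat) :
    (popA stk c).2 = c + (toCounts stk).1 ∧ toCounts (popA stk c).1 = (0, (toCounts stk).2) := by
  induction stk generalizing c with
  | nil => simp [popA, toCounts]
  | cons x s ih =>
    by_cases hx : x = '('
    · simp [popA, toCounts, hx]
    · have := ih (c + 1)
      simp [popA, toCounts, hx] at this ⊢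
      exact ⟨by omega, this.2⟩

theorem goA_eq_goB (rest : List Char) (stk : List Char) :
    goA stk rest = goB (toCounts stk).1 (toCounts stk).2 rest := by
  induction rest generalizing stk with
  | nil => simp [goA, goB]
  | cons ch r ih =>
    by_cases hp : ch = ')'
    · have h := popA_toCounts stk 0
      by_cases hc : (toCounts stk).1 ≤ 1
      · simp [goA, goB, hp, h.1, hc]
      · simp [goA, goB, hp, h.1, hc, ih (popA stk 0).1, h.2]
    · by_cases ho : ch = '('
      · simp [goA, goB, ho, ih ('(' :: stk), toCounts]
      · simp [goA, goB, hp, ho, ih (ch :: stk), toCounts]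

-- ===== VERDICT (by name: the statement is the Claim_ definition above) =====
theorem find_dup_paren_spec : Claim_equal_find_dup_paren := by
  intro expn _
  unfold Spec_find_dup_paren find_dup_paren find_dup_paren_alt
  simpa [toCounts] using goA_eq_goB expn.toList []
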